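-- pv_equiv track=rewrite | github.com/icann/root-metrics | new_collector_processing.py | check_for_signed_rr
-- ===== SOURCE A (Python) =====
-- def check_for_signed_rr(list_of_records_from_section, name_of_rrtype):
-- 	# Part of correctness checking
-- 	#   See if there is a record in the list of the given RRtype, and make sure there is also an RRSIG for that RRtype
-- 	found_rrtype = False
-- 	for this_full_record in list_of_records_from_section:
-- 		(rec_qname, _, _, rec_qtype, rec_rdata) = this_full_record.split(" ", maxsplit=4)
-- 		if rec_qtype == name_of_rrtype:
-- 			found_rrtype = True
-- 			break
-- 	if not found_rrtype:
-- 		return "No record of type {} was found in that section".format(name_of_rrtype)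
-- 	found_rrsig = False
-- 	for this_full_record in list_of_records_from_section:
-- 		(rec_qname, _, _, rec_qtype, rec_rdata) = this_full_record.split(" ", maxsplit=4)
-- 		if rec_qtype == "RRSIG":
-- 			found_rrsig = True
-- 			break
-- 	if not found_rrsig:
-- 		return "One more more records of type {} were found in that section, but there was no RRSIG".format(name_of_rrtype)
-- 	return ""
-- ===== SOURCE B (Python) =====
-- def check_for_signed_rr(list_of_records_from_section, name_of_rrtype):
--     # One pass: split each record once, track both flags, stop as soon as both are set
--     found_rrtype = False
--     found_rrsig = False
--     for this_full_record in list_of_records_from_section: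
--         (rec_qname, _, _, rec_qtype, rec_rdata) = this_full_record.split(" ", maxsplit=4)
--         if rec_qtype == name_of_rrtype:
--             found_rrtype = True
--         if rec_qtype == "RRSIG":
--             found_rrsig = True
--         if found_rrtype and found_rrsig:
--             break
--     if not found_rrtype:
--         return "No record of type {} was found in that section".format(name_of_rrtype)
--     if not found_rrsig:
--         return "One more more records of type {} were found in that section, but there was no RRSIG".format(name_of_rrtype)
--     return ""
-- ===== Notes on version B (the rewrite author's own statement) =====
-- stated objective: simpler
-- what changed: Replaces A's two separate scans (each re-splitting every record) with one pass that splits each record once, sets both flags, and breaks as soon as both are found.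
import Mathlib
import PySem

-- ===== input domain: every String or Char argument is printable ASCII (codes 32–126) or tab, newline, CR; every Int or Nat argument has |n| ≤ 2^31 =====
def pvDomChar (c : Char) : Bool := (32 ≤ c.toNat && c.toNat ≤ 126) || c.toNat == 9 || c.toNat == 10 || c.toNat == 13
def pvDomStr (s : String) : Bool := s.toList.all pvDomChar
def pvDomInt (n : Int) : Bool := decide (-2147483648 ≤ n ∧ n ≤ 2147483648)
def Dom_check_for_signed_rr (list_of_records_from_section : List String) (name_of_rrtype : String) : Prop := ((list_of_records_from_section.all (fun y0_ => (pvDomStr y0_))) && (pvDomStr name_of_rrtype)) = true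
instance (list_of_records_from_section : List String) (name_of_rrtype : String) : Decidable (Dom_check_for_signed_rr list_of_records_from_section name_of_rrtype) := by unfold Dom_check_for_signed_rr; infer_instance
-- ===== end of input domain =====

-- B replaces A's two scans with one single pass over the records that splits each
-- record once, tracks both flags and breaks as soon as both are set (objective: simpler).


-- ===== PORT A =====
-- this_full_record.split(" ", maxsplit=4): the getD [] never fires (sep ≠ "")
def pvParts (r : String) : List String := (PySem.Str.splitMax? r " " 4).getD []
-- rec_qtype from the 5-tuple unpack; exact whenever the record splits into 5 parts —
-- Pre_ excludes inputs where Python's unpack raises ValueError on a reached record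
def pvQtype (r : String) : String := ((pvParts r)[3]?).getD ""

-- A's first loop and (with t = "RRSIG") A's second loop: scan, break at first match
def pvLoopA (xs : List String) (t : String) : Bool :=
  match xs with
  | [] => false
  | r :: rest => if pvQtype r == t then true else pvLoopA rest t

def check_for_signed_rr (list_of_records_from_section : List String) (name_of_rrtype : String) : String :=
  if !(pvLoopA list_of_records_from_section name_of_rrtype) then
    "No record of type " ++ name_of_rrtype ++ " was found in that section"
  else if !(pvLoopA list_of_records_from_section "RRSIG") then
    "One more more records of type " ++ name_of_rrtype ++ " were found in that section, but there was no RRSIG"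
  else ""

-- ===== PORT B =====
-- B's single pass: split once per record, update both flags, break when both are set
def pvLoopB (xs : List String) (t : String) (ft fs : Bool) : Bool × Bool :=
  match xs with
  | [] => (ft, fs)
  | r :: rest =>
    let q := pvQtype r
    let ft' := ft || (q == t)
    let fs' := fs || (q == "RRSIG")
    if ft' && fs' then (ft', fs') else pvLoopB rest t ft' fs'

def check_for_signed_rr_alt (list_of_records_from_section : List String) (name_of_rrtype : String) : String :=
  let p := pvLoopB list_of_records_from_section name_of_rrtype false false
  if !p.1 then
    "No record of type " ++ name_of_rrtype ++ " was found in that section"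
  else if !p.2 then
    "One more more records of type " ++ name_of_rrtype ++ " were found in that section, but there was no RRSIG"
  else ""

-- ===== PRECONDITION & SPEC =====
-- record is well formed (splits into 5 parts, i.e. the Python 5-tuple unpack succeeds)
def pvWF (r : String) : Bool := (pvParts r).length == 5
-- the prefix of xs strictly before the first well-formed record of qtype t (whole list if none)
def pvUpTo (xs : List String) (t : String) : List String :=
  xs.takeWhile (fun r => !(pvWF r && pvQtype r == t))
-- Pre_ excludes exactly the inputs where Python A raises ValueError: a record with fewer
-- than 5 space-separated fields reached by one of A's loops before that loop's break
def Pre_check_for_signed_rr (list_of_records_from_section : List String) (name_of_rrtype : String) : Prop :=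
  (pvUpTo list_of_records_from_section name_of_rrtype).all pvWF = true ∧
  (list_of_records_from_section.any (fun r => pvWF r && pvQtype r == name_of_rrtype) = true →
    (pvUpTo list_of_records_from_section "RRSIG").all pvWF = true)
instance (list_of_records_from_section : List String) (name_of_rrtype : String) : Decidable (Pre_check_for_signed_rr list_of_records_from_section name_of_rrtype) := by unfold Pre_check_for_signed_rr; infer_instance
def pvWitness_check_for_signed_rr : List String × String := (["a 1 IN NS b", "a 1 IN RRSIG sig"], "NS")

def Spec_check_for_signed_rr (list_of_records_from_section : List String) (name_of_rrtype : String) (out : String) : Prop := out = check_for_signed_rr_alt list_of_records_from_section name_of_rrtype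
instance (list_of_records_from_section : List String) (name_of_rrtype : String) (out : String) : Decidable (Spec_check_for_signed_rr list_of_records_from_section name_of_rrtype out) := by unfold Spec_check_for_signed_rr; infer_instance

-- ===== CLAIM (what is proved, stated in full; the proofs are below) =====
def Claim_equal_check_for_signed_rr : Prop := ∀ (list_of_records_from_section : List String) (name_of_rrtype : String), Dom_check_for_signed_rr list_of_records_from_section name_of_rrtype → Pre_check_for_signed_rr list_of_records_from_section name_of_rrtype → Spec_check_for_signed_rr list_of_records_from_section name_of_rrtype (check_for_signed_rr list_of_records_from_section name_of_rrtype)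

-- ===== LEMMAS AND PROOFS =====
-- A's break-at-first-match loop computes existence of a match
theorem pvLoopA_any (xs : List String) (t : String) :
    pvLoopA xs t = xs.any (fun r => pvQtype r == t) := by
  induction xs with
  | nil => rfl
  | cons r rest ih =>
    by_cases h : pvQtype r == t
    · simp [pvLoopA, h]
    · simp [pvLoopA, h, ih]

-- B's break-when-both loop also computes existence of each match
theorem pvLoopB_any (xs : List String) (t : String) (ft fs : Bool) :
    pvLoopB xs t ft fs =
      (ft || xs.any (fun r => pvQtype r == t), fs || xs.any (fun r => pvQtype r == "RRSIG")) := by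
  induction xs generalizing ft fs with
  | nil => simp [pvLoopB]
  | cons r rest ih =>
    simp only [pvLoopB]
    split
    next h =>
      rw [Bool.and_eq_true] at h
      have h1 := h
      simp [List.any_cons, ← Bool.or_assoc, h1.1, h1.2]
    next h =>
      simp [ih, List.any_cons, Bool.or_assoc]

-- ===== VERDICT (by name: the statement is the Claim_ definition above) =====
theorem check_for_signed_rr_spec : Claim_equal_check_for_signed_rr := by
  intro xs name _ _
  unfold Spec_check_for_signed_rr check_for_signed_rr check_for_signed_rr_alt
  simp [pvLoopA_any, pvLoopB_any]
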